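-- pv_equiv track=rewrite | github.com/dswang2011/Masked-CS-LM | src/preprocess_data/tok_util.py | get_relative_info
-- ===== SOURCE A (Python) =====
-- def get_relative_info(boxes,neibors, token_nums):
--     seg_widths, seg_heights = [],[]
--     for idx, neib in enumerate(neibors):    # (dist, direct, neib_idx)
--         w,h = boxes[idx][2]-boxes[idx][0], boxes[idx][3]-boxes[idx][1]
--         s_w, s_h = [w],[h]
--
--         for direct in range(1,9):
--             if direct not in neib:
--                 s_w.append(1000)
--                 s_h.append(1000)
--             else:
--                 dist, direct, neib_idx = neib[direct]
--                 nw,nh = boxes[neib_idx][2]-boxes[neib_idx][0], boxes[neib_idx][3]-boxes[neib_idx][1]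
--                 s_w.append(nw)
--                 s_h.append(nh)
--         seg_widths.append(s_w)
--         seg_heights.append(s_h)
--     return seg_widths, seg_heights
-- ===== SOURCE B (Python) =====
-- def get_relative_info(boxes, neibors, token_nums):
--     # Stage 1: index rows — each token's row of box indices (None = missing direction).
--     rows = [[idx] + [neib[d][2] if d in neib else None for d in range(1, 9)]
--             for idx, neib in enumerate(neibors)]
--     # Stage 2: dimensions table over exactly the box indices the rows reference.
--     dims = {i: (boxes[i][2] - boxes[i][0], boxes[i][3] - boxes[i][1])
--             for row in rows for i in row if i is not None}
--     # Stage 3: consume the table.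
--     return ([[dims[i][0] if i is not None else 1000 for i in row] for row in rows],
--             [[dims[i][1] if i is not None else 1000 for i in row] for row in rows])
-- ===== Notes on version B (the rewrite author's own statement) =====
-- stated objective: alternative
-- what changed: A's single fused pass that computes dimensions inline while threading two parallel accumulators is replaced by three staged passes: build per-token rows of referenced box indices (None for missing directions), build a dimensions dict over exactly those indices, then consume the dict to produce the width and height tables.
import Mathlib
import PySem

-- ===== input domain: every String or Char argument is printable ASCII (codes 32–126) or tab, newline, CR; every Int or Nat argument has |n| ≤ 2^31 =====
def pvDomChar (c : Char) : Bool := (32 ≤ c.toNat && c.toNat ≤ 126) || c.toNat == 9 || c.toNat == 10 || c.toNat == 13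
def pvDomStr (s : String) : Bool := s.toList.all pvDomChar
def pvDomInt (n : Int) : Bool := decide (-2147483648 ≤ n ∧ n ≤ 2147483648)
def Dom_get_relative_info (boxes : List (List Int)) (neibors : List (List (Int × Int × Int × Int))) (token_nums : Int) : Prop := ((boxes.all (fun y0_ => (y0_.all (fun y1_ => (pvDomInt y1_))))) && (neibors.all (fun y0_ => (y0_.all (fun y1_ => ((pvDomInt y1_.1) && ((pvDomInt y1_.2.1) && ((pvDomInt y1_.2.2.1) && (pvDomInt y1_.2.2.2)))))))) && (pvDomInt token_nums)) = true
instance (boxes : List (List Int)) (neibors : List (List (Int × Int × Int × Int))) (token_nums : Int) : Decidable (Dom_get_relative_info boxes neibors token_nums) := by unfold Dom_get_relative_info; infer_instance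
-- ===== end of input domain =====

-- B replaces A's fused single pass by three staged passes: build index rows, build a
-- dimensions table (dict) over exactly the referenced box indices, then consume the
-- table (objective: alternative decomposition, same cost).


-- ===== PORT A =====
-- literal transliteration of A: one fused pass over enumerate(neibors), two parallel
-- accumulators s_w/s_h extended direction by direction, results appended to two result lists.
-- 'direct in neib' / 'neib[direct]' are dict membership/lookup (neib is dict[int, 3-tuple],
-- here the association list PySem.Dict.mk neib).
def get_relative_info (boxes : List (List Int)) (neibors : List (List (Int × Int × Int × Int))) (token_nums : Int) : List (List Int) × List (List Int) :=
  (PySem.List.enumerate neibors).foldl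
    (fun acc p =>
      let idx := p.1
      let neib := p.2
      let bi := PySem.List.pyGetD boxes idx []
      let w := PySem.List.pyGetD bi 2 0 - PySem.List.pyGetD bi 0 0
      let h := PySem.List.pyGetD bi 3 0 - PySem.List.pyGetD bi 1 0
      let swsh := (PySem.List.pyRange 1 9 1).foldl
        (fun (s : List Int × List Int) direct =>
          match (PySem.Dict.mk neib).get? direct with
          | none => (s.1 ++ [1000], s.2 ++ [1000])
          | some t =>
            let neib_idx := t.2.2
            let nb := PySem.List.pyGetD boxes neib_idx []
            let nw := PySem.List.pyGetD nb 2 0 - PySem.List.pyGetD nb 0 0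
            let nh := PySem.List.pyGetD nb 3 0 - PySem.List.pyGetD nb 1 0
            (s.1 ++ [nw], s.2 ++ [nh]))
        ([w], [h])
      (acc.1 ++ [swsh.1], acc.2 ++ [swsh.2]))
    ([], [])

-- ===== PORT B =====
-- Source B stage 1: one token's row of referenced box indices,
-- [idx] + [neib[d][2] if d in neib else None for d in range(1,9)]  (None -> none)
def pvIdxRow (neib : List (Int × Int × Int × Int)) : List (Option Int) :=
  (PySem.List.pyRange 1 9 1).map (fun d => ((PySem.Dict.mk neib).get? d).map (fun t => t.2.2))

def pvRows (neibors : List (List (Int × Int × Int × Int))) : List (List (Option Int)) :=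
  (PySem.List.enumerate neibors).map (fun p => some p.1 :: pvIdxRow p.2)

-- the dict-comprehension's value expression (boxes[i][2]-boxes[i][0], boxes[i][3]-boxes[i][1])
def pvDim (boxes : List (List Int)) (i : Int) : Int × Int :=
  let b := PySem.List.pyGetD boxes i []
  (PySem.List.pyGetD b 2 0 - PySem.List.pyGetD b 0 0,
   PySem.List.pyGetD b 3 0 - PySem.List.pyGetD b 1 0)

-- Source B stage 2: {i: dims for row in rows for i in row if i is not None}
def pvDims (boxes : List (List Int)) (rows : List (List (Option Int))) : PySem.Dict Int (Int × Int) :=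
  rows.foldl (fun d row =>
    row.foldl (fun d o =>
      match o with
      | some i => d.insert i (pvDim boxes i)
      | none => d) d) PySem.Dict.empty

-- Source B stage 3. Python's dims[i] raises KeyError on a missing key; by construction every i
-- occurring in rows is a key of dims (proved in pv_dims_lookup below), so getD's default is never used.
def get_relative_info_alt (boxes : List (List Int)) (neibors : List (List (Int × Int × Int × Int))) (token_nums : Int) : List (List Int) × List (List Int) :=
  let rows := pvRows neibors
  let dims := pvDims boxes rows
  (rows.map (fun row => row.map (fun o =>
      match o with
      | some i => ((dims.get? i).getD (0, 0)).1
      | none => 1000)),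
   rows.map (fun row => row.map (fun o =>
      match o with
      | some i => ((dims.get? i).getD (0, 0)).2
      | none => 1000)))

-- ===== PRECONDITION & SPEC =====
-- box i exists (Python indexing, negative i from the end) and has the 4 coordinates A reads
def pvBoxOK (boxes : List (List Int)) (i : Int) : Bool :=
  match PySem.List.pyGet? boxes i with
  | some b => 4 ≤ b.length
  | none => false

-- Pre_: exactly the inputs on which A returns (no IndexError): every token index has a
-- 4-coordinate box, and every neighbor entry keyed 1..8 points at a 4-coordinate box.
-- (For an entry shadowed by an earlier duplicate key this is slightly stricter than A needs;
-- Python dicts cannot have duplicate keys, so no input A accepts is lost.)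
def Pre_get_relative_info (boxes : List (List Int)) (neibors : List (List (Int × Int × Int × Int))) (token_nums : Int) : Prop :=
  ((List.range neibors.length).all (fun i => pvBoxOK boxes (i : Int))
    && neibors.all (fun neib => neib.all (fun e =>
         !(1 ≤ e.1 && e.1 ≤ 8) || pvBoxOK boxes e.2.2.2))) = true
instance (boxes : List (List Int)) (neibors : List (List (Int × Int × Int × Int))) (token_nums : Int) : Decidable (Pre_get_relative_info boxes neibors token_nums) := by unfold Pre_get_relative_info; infer_instance

def pvWitness_get_relative_info : List (List Int) × (List (List (Int × Int × Int × Int))) × Int :=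
  ([[0, 0, 2, 3], [1, 1, 4, 6]], [[(1, 5, 1, 1)], []], 2)

def Spec_get_relative_info (boxes : List (List Int)) (neibors : List (List (Int × Int × Int × Int))) (token_nums : Int) (out : List (List Int) × List (List Int)) : Prop := out = get_relative_info_alt boxes neibors token_nums
instance (boxes : List (List Int)) (neibors : List (List (Int × Int × Int × Int))) (token_nums : Int) (out : List (List Int) × List (List Int)) : Decidable (Spec_get_relative_info boxes neibors token_nums out) := by unfold Spec_get_relative_info; infer_instance

-- ===== CLAIM (what is proved, stated in full; the proofs are below) =====
def Claim_equal_get_relative_info : Prop := ∀ (boxes : List (List Int)) (neibors : List (List (Int × Int × Int × Int))) (token_nums : Int), Dom_get_relative_info boxes neibors token_nums → Pre_get_relative_info boxes neibors token_nums → Spec_get_relative_info boxes neibors token_nums (get_relative_info boxes neibors token_nums)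

-- ===== LEMMAS AND PROOFS =====

-- "every value stored in d is the dimension of its key"
def pvGood (f : Int → Int × Int) (d : PySem.Dict Int (Int × Int)) : Prop :=
  ∀ j v, d.get? j = some v → v = f j

-- the dict-building step of pvDims over one option
def pvStep (f : Int → Int × Int) (d : PySem.Dict Int (Int × Int)) (o : Option Int) : PySem.Dict Int (Int × Int) :=
  match o with
  | some i => d.insert i (f i)
  | none => d

theorem pv_good_step (f : Int → Int × Int) (d : PySem.Dict Int (Int × Int)) (o : Option Int)
    (h : pvGood f d) : pvGood f (pvStep f d o) := by
  cases o with
  | none => exact h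
  | some i =>
    intro j v hv
    rw [pvStep, PySem.Dict.get?_insert] at hv
    split at hv
    · cases hv; simp [*]
    · exact h j v hv

theorem pv_step_mono (f : Int → Int × Int) (d : PySem.Dict Int (Int × Int)) (o : Option Int)
    (i : Int) (h : (d.get? i).isSome) : ((pvStep f d o).get? i).isSome := by
  cases o with
  | none => exact h
  | some k =>
    rw [pvStep, PySem.Dict.get?_insert]
    split <;> simp [h]

theorem pv_rowfold (f : Int → Int × Int) (l : List (Option Int)) (d : PySem.Dict Int (Int × Int))
    (hg : pvGood f d) :
    pvGood f (l.foldl (pvStep f) d)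
    ∧ (∀ i, (d.get? i).isSome → ((l.foldl (pvStep f) d).get? i).isSome)
    ∧ (∀ i, some i ∈ l → ((l.foldl (pvStep f) d).get? i).isSome) := by
  induction l generalizing d with
  | nil => exact ⟨hg, fun i h => h, by simp⟩
  | cons o l ih =>
    obtain ⟨g', mono', mem'⟩ := ih (pvStep f d o) (pv_good_step f d o hg)
    refine ⟨g', fun i h => mono' i (pv_step_mono f d o i h), ?_⟩
    intro i hi
    rcases List.mem_cons.mp hi with h | h
    · subst h
      apply mono'
      rw [pvStep, PySem.Dict.get?_insert]
      simp
    · exact mem' i h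

theorem pv_rowsfold (f : Int → Int × Int) (rs : List (List (Option Int))) (d : PySem.Dict Int (Int × Int))
    (hg : pvGood f d) :
    pvGood f (rs.foldl (fun d row => row.foldl (pvStep f) d) d)
    ∧ (∀ i, (d.get? i).isSome → ((rs.foldl (fun d row => row.foldl (pvStep f) d) d).get? i).isSome)
    ∧ (∀ row ∈ rs, ∀ i, some i ∈ row → ((rs.foldl (fun d row => row.foldl (pvStep f) d) d).get? i).isSome) := by
  induction rs generalizing d with
  | nil => exact ⟨hg, fun i h => h, by simp⟩
  | cons r rs ih =>
    obtain ⟨g0, mono0, mem0⟩ := pv_rowfold f r d hg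
    obtain ⟨g', mono', mem'⟩ := ih (r.foldl (pvStep f) d) g0
    refine ⟨g', fun i h => mono' i (mono0 i h), ?_⟩
    intro row hrow i hi
    rcases List.mem_cons.mp hrow with h | h
    · subst h; exact mono' i (mem0 i hi)
    · exact mem' row h i hi

-- every index occurring in rows is a key of pvDims, with its dimension as value
theorem pv_dims_lookup (boxes : List (List Int)) (rows : List (List (Option Int)))
    (row : List (Option Int)) (hrow : row ∈ rows) (i : Int) (hi : some i ∈ row) :
    (pvDims boxes rows).get? i = some (pvDim boxes i) := by
  have hsame : pvDims boxes rows = rows.foldl (fun d row => row.foldl (pvStep (pvDim boxes)) d) PySem.Dict.empty := by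
    unfold pvDims pvStep; rfl
  have hempty : pvGood (pvDim boxes) PySem.Dict.empty := by
    intro j v hv; simp [PySem.Dict.get?_empty] at hv
  obtain ⟨g', _, mem'⟩ := pv_rowsfold (pvDim boxes) rows PySem.Dict.empty hempty
  have hs := mem' row hrow i hi
  rw [← hsame] at hs g'
  obtain ⟨v, hv⟩ := Option.isSome_iff_exists.mp hs
  rw [hv, g' i v hv]

-- A's inner direction loop, rewritten as B's index row mapped through pvDim (accumulator generalized)
theorem pv_inner (boxes : List (List Int)) (neib : List (Int × Int × Int × Int))
    (ds : List Int) (sw sh : List Int) :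
    ds.foldl
      (fun (s : List Int × List Int) direct =>
        match (PySem.Dict.mk neib).get? direct with
        | none => (s.1 ++ [1000], s.2 ++ [1000])
        | some t =>
          let neib_idx := t.2.2
          let nb := PySem.List.pyGetD boxes neib_idx []
          let nw := PySem.List.pyGetD nb 2 0 - PySem.List.pyGetD nb 0 0
          let nh := PySem.List.pyGetD nb 3 0 - PySem.List.pyGetD nb 1 0
          (s.1 ++ [nw], s.2 ++ [nh]))
      (sw, sh)
    = (sw ++ (ds.map (fun d =>
          match ((PySem.Dict.mk neib).get? d).map (fun t => t.2.2) with
          | some i => (pvDim boxes i).1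
          | none => (1000 : Int))),
       sh ++ (ds.map (fun d =>
          match ((PySem.Dict.mk neib).get? d).map (fun t => t.2.2) with
          | some i => (pvDim boxes i).2
          | none => (1000 : Int)))) := by
  induction ds generalizing sw sh with
  | nil => simp
  | cons d ds ih =>
    cases h : (PySem.Dict.mk neib).get? d with
    | none => simp [List.foldl_cons, h, ih]
    | some t => simp [List.foldl_cons, h, ih, pvDim]

-- A's outer loop, rewritten as maps over B's index rows (accumulator generalized)
theorem pv_outer (boxes : List (List Int)) (l : List (Int × List (Int × Int × Int × Int)))
    (a1 a2 : List (List Int)) :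
    l.foldl
      (fun acc p =>
        let idx := p.1
        let neib := p.2
        let bi := PySem.List.pyGetD boxes idx []
        let w := PySem.List.pyGetD bi 2 0 - PySem.List.pyGetD bi 0 0
        let h := PySem.List.pyGetD bi 3 0 - PySem.List.pyGetD bi 1 0
        let swsh := (PySem.List.pyRange 1 9 1).foldl
          (fun (s : List Int × List Int) direct =>
            match (PySem.Dict.mk neib).get? direct with
            | none => (s.1 ++ [1000], s.2 ++ [1000])
            | some t =>
              let neib_idx := t.2.2
              let nb := PySem.List.pyGetD boxes neib_idx []
              let nw := PySem.List.pyGetD nb 2 0 - PySem.List.pyGetD nb 0 0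
              let nh := PySem.List.pyGetD nb 3 0 - PySem.List.pyGetD nb 1 0
              (s.1 ++ [nw], s.2 ++ [nh]))
          ([w], [h])
        (acc.1 ++ [swsh.1], acc.2 ++ [swsh.2]))
      (a1, a2)
    = (a1 ++ l.map (fun p => (some p.1 :: pvIdxRow p.2).map (fun o =>
          match o with
          | some i => (pvDim boxes i).1
          | none => (1000 : Int))),
       a2 ++ l.map (fun p => (some p.1 :: pvIdxRow p.2).map (fun o =>
          match o with
          | some i => (pvDim boxes i).2
          | none => (1000 : Int)))) := by
  induction l generalizing a1 a2 with
  | nil => simp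
  | cons p l ih =>
    simp only [List.foldl_cons, List.map_cons]
    rw [pv_inner, ih]
    simp [pvIdxRow, pvDim, List.map_map, Function.comp_def]

-- ===== VERDICT (by name: the statement is the Claim_ definition above) =====
theorem get_relative_info_spec : Claim_equal_get_relative_info := by
  intro boxes neibors token_nums _ _
  unfold Spec_get_relative_info get_relative_info get_relative_info_alt
  rw [pv_outer]
  simp only [List.nil_append, pvRows, Prod.mk.injEq]
  constructor <;>
  · rw [List.map_map]
    refine List.map_congr_left ?_
    intro p hp
    simp only [Function.comp_apply]
    refine List.map_congr_left ?_
    intro o ho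
    cases o with
    | none => rfl
    | some i =>
      have hrow : (some p.1 :: pvIdxRow p.2) ∈ pvRows neibors := by
        unfold pvRows; exact List.mem_map_of_mem hp
      have h := pv_dims_lookup boxes (pvRows neibors) _ hrow i ho
      unfold pvRows at h
      simp [h]
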